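-- pv_equiv track=rewrite | github.com/TeraBT/uibk-python | exercise-4/porter.py | is_consonant
-- ===== SOURCE A (Python) =====
-- def is_consonant(word, index):
-- 	if word[index] in ['a', 'e', 'i', 'o', 'u']:
-- 		return False
-- 	if word[index] == 'y':
-- 		if index == 0:
-- 			return True
-- 		else:
-- 			return not is_consonant(word, index - 1)
-- 	return True
-- ===== SOURCE B (Python) =====
-- def is_consonant(word, index):
--     c = word[index]
--     if c in ('a', 'e', 'i', 'o', 'u'):
--         return False
--     if c != 'y':
--         return True
--     # walk back over the run of 'y's, counting steps
--     steps = 0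
--     while word[index] == 'y' and index != 0:
--         index -= 1
--         steps += 1
--     ch = word[index]
--     base = ch not in ('a', 'e', 'i', 'o', 'u')
--     return base if steps % 2 == 0 else not base
-- ===== Notes on version B (the rewrite author's own statement) =====
-- stated objective: alternative
-- what changed: Replaces A's recursion over the 'y' run with an iterative backward scan that counts the run length and derives the answer from the base character flipped by the step-count parity.
import Mathlib
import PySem

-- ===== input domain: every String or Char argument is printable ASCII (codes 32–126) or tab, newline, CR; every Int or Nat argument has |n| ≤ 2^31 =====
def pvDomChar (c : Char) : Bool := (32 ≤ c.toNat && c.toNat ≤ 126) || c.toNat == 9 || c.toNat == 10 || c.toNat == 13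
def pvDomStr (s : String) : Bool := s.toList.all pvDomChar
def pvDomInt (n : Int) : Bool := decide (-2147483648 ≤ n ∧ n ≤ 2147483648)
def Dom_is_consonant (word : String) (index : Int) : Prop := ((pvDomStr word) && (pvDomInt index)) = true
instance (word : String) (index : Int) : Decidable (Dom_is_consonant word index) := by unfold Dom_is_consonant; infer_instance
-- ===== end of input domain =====

-- B replaces A's recursion over the 'y' run with an iterative backward scan plus a parity flip (alternative decomposition; same cost).

-- ===== PORT A =====
-- fuel-guarded transliteration of A's recursion; the fuel (index + len + 1) is never exhausted
-- on inputs admitted by Pre_ below; the 'none' branch is Python's IndexError (excluded by Pre_)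
def isConsAux (w : List Char) : Nat → Int → Bool
  | 0, _ => false
  | fuel + 1, index =>
    match PySem.List.pyGet? w index with
    | none => false
    | some c =>
      if c ∈ ['a', 'e', 'i', 'o', 'u'] then false
      else if c = 'y' then
        if index = 0 then true
        else !(isConsAux w fuel (index - 1))
      else true

def is_consonant (word : String) (index : Int) : Bool :=
  isConsAux word.toList (index + word.toList.length + 1).toNat index

-- ===== PORT B =====
-- the while loop of Source B: walk back while word[index] == 'y' and index != 0, counting steps
-- (fuel-guarded for totality; never exhausted under Pre_)
def scanY (w : List Char) : Nat → Int → Nat → Int × Nat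
  | 0, index, steps => (index, steps)
  | fuel + 1, index, steps =>
    if PySem.List.pyGet? w index = some 'y' ∧ index ≠ 0 then
      scanY w fuel (index - 1) (steps + 1)
    else (index, steps)

def is_consonant_alt (word : String) (index : Int) : Bool :=
  let w := word.toList
  match PySem.List.pyGet? w index with
  | none => false
  | some c =>
    if c ∈ ['a', 'e', 'i', 'o', 'u'] then false
    else if c ≠ 'y' then true
    else
      let p := scanY w (index + w.length + 1).toNat index 0
      let base : Bool :=
        match PySem.List.pyGet? w p.1 with
        | none => false
        | some ch => !(ch ∈ ['a', 'e', 'i', 'o', 'u'])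
      if p.2 % 2 = 0 then base else !base

-- ===== PRECONDITION & SPEC =====
-- Pre_ admits exactly the inputs on which Python A returns: the index is in range, and for a
-- negative index the backward walk over 'y's meets a non-'y' character before falling off the
-- front of the word (otherwise A raises IndexError; B raises the same there).
def Pre_is_consonant (word : String) (index : Int) : Prop :=
  -(word.toList.length : Int) ≤ index ∧ index < word.toList.length ∧
  (0 ≤ index ∨ ∃ c ∈ word.toList.take (index + word.toList.length + 1).toNat, c ≠ 'y')
instance (word : String) (index : Int) : Decidable (Pre_is_consonant word index) := by
  unfold Pre_is_consonant; infer_instance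

def pvWitness_is_consonant : String × Int := ("try", 1)

def Spec_is_consonant (word : String) (index : Int) (out : Bool) : Prop := out = is_consonant_alt word index
instance (word : String) (index : Int) (out : Bool) : Decidable (Spec_is_consonant word index out) := by unfold Spec_is_consonant; infer_instance

-- ===== CLAIM (what is proved, stated in full; the proofs are below) =====
def Claim_equal_is_consonant : Prop := ∀ (word : String) (index : Int), Dom_is_consonant word index → Pre_is_consonant word index → Spec_is_consonant word index (is_consonant word index)

-- ===== LEMMAS AND PROOFS =====

-- Stops w fuel index: the Python recursion/loop starting at index terminates normally within fuel steps
def Stops (w : List Char) : Nat → Int → Prop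
  | 0, _ => False
  | fuel + 1, index =>
    (PySem.List.pyGet? w index).isSome ∧
    (PySem.List.pyGet? w index = some 'y' → index ≠ 0 → Stops w fuel (index - 1))

-- the value Source B computes from the scan result: base character verdict, flipped by step parity
def valB (w : List Char) (p : Int × Nat) : Bool :=
  let base : Bool :=
    match PySem.List.pyGet? w p.1 with
    | none => false
    | some ch => !(ch ∈ ['a', 'e', 'i', 'o', 'u'])
  if p.2 % 2 = 0 then base else !base

lemma run_lemma (w : List Char) :
    ∀ fuel (index : Int) (steps : Nat), Stops w fuel index →
      isConsAux w fuel index = xor (valB w (scanY w fuel index steps)) (decide (steps % 2 = 1)) := by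
  intro fuel
  induction fuel with
  | zero => intro index steps h; exact absurd h (by simp [Stops])
  | succ n ih =>
    intro index steps h
    obtain ⟨hs, hrec⟩ := h
    obtain ⟨c, hg⟩ := Option.isSome_iff_exists.mp hs
    by_cases hcy : c = 'y'
    · subst hcy
      by_cases hi0 : index = 0
      · subst hi0
        simp only [isConsAux, scanY, hg]
        rcases Nat.mod_two_eq_zero_or_one steps with hp | hp <;>
          simp [valB, hg, hp]
      · have hcond : PySem.List.pyGet? w index = some 'y' ∧ index ≠ 0 := ⟨hg, hi0⟩
        have hIH := ih (index - 1) (steps + 1) (hrec hg hi0)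
        have hscan : scanY w (n + 1) index steps = scanY w n (index - 1) (steps + 1) := by
          rw [scanY, if_pos hcond]
        have hA : isConsAux w (n + 1) index = !(isConsAux w n (index - 1)) := by
          simp only [isConsAux, hg]
          simp only [if_true]
          rw [if_neg hi0, if_neg (by decide : ¬('y' ∈ ['a', 'e', 'i', 'o', 'u']))]
        rw [hA, hscan, hIH]
        generalize valB w (scanY w n (index - 1) (steps + 1)) = v
        rcases Nat.mod_two_eq_zero_or_one steps with hp | hp <;>
          cases v <;> simp [Nat.add_mod, hp]
    · have hcond : ¬(PySem.List.pyGet? w index = some 'y' ∧ index ≠ 0) := by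
        simp [hg]; intro h'; exact absurd h' hcy
      simp only [isConsAux, scanY, hg]
      by_cases hv : c ∈ ['a', 'e', 'i', 'o', 'u'] <;>
        rcases Nat.mod_two_eq_zero_or_one steps with hp | hp <;>
          simp [hv, hcy, valB, hg, hp]

lemma stops_of_pre (w : List Char) :
    ∀ fuel (index : Int), fuel = (index + w.length + 1).toNat →
      -(w.length : Int) ≤ index → index < w.length →
      (0 ≤ index ∨ ∃ c ∈ w.take (index + w.length + 1).toNat, c ≠ 'y') →
      Stops w fuel index := by
  intro fuel
  induction fuel with
  | zero => intro index hf h1 h2 _; exfalso; omega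
  | succ n ih =>
    intro index hf h1 h2 hesc
    have hrange : PySem.Raise.InRange w.length index := ⟨h1, h2⟩
    have hsome : (PySem.List.pyGet? w index).isSome := by
      rw [Option.isSome_iff_ne_none]
      intro hnone
      exact (PySem.List.pyGet?_eq_none_iff w index).mp hnone hrange
    refine ⟨hsome, ?_⟩
    intro hy hi0
    by_cases hpos : 0 ≤ index
    · exact ih (index - 1) (by omega) (by omega) (by omega) (Or.inl (by omega))
    · -- index < 0: the escape witness (a non-'y' in the prefix) drives the induction
      rcases hesc with h | ⟨c, hcmem, hcne⟩
      · omega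
      · -- position actually read: pos = index + len (as a Nat)
        have hneg : index < 0 := by omega
        have hyget : w[(w.length - (-index).toNat)]? = some 'y' := by
          simpa [PySem.List.pyGet?, PySem.List.pyIdx?, if_neg (by omega : ¬(0 : Int) ≤ index),
            if_pos h1] using hy
        obtain ⟨j, hj⟩ := List.mem_iff_getElem?.mp hcmem
        rw [List.getElem?_take] at hj
        by_cases hjk : j < (index + w.length + 1).toNat
        · rw [if_pos hjk] at hj
          have hpos_eq : w.length - (-index).toNat = (index + w.length).toNat := by omega
          have hne_low : -(w.length : Int) < index := by
            by_contra hle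
            have hidx : index = -(w.length : Int) := by omega
            have hj0 : j = 0 := by omega
            have hz : w.length - (-index).toNat = 0 := by omega
            rw [hz] at hyget
            rw [hj0] at hj
            rw [hj] at hyget
            exact hcne (by injection hyget)
          have hjpos : j ≠ (index + w.length).toNat := by
            intro hje
            rw [hpos_eq] at hyget
            rw [hje] at hj
            rw [hj] at hyget
            exact hcne (by injection hyget)
          refine ih (index - 1) (by omega) (by omega) (by omega) (Or.inr ⟨c, ?_, hcne⟩)
          refine List.mem_iff_getElem?.mpr ⟨j, ?_⟩
          rw [List.getElem?_take, if_pos (by omega)]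
          exact hj
        · rw [if_neg hjk] at hj; exact absurd hj (by simp)

theorem is_consonant_spec : Claim_equal_is_consonant := by
  intro word index _ hpre
  obtain ⟨h1, h2, hesc⟩ := hpre
  unfold Spec_is_consonant is_consonant is_consonant_alt
  have hst := stops_of_pre word.toList _ index rfl h1 h2 hesc
  have hsome : (PySem.List.pyGet? word.toList index).isSome := by
    rw [Option.isSome_iff_ne_none]
    intro hnone
    exact (PySem.List.pyGet?_eq_none_iff word.toList index).mp hnone ⟨h1, h2⟩
  obtain ⟨c, hg⟩ := Option.isSome_iff_exists.mp hsome
  have hfuelpos : (index + (word.toList.length : Int) + 1).toNat ≠ 0 := by omega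
  obtain ⟨n, hn⟩ := Nat.exists_eq_succ_of_ne_zero hfuelpos
  by_cases hv : c ∈ ['a', 'e', 'i', 'o', 'u']
  · rw [hn]; simp [isConsAux, hg, hv]
  · by_cases hcy : c = 'y'
    · subst hcy
      have hrun := run_lemma word.toList _ index 0 hst
      simp only [Nat.zero_mod] at hrun
      simp only [hg, hv, ite_not, hrun, valB]
      simp
    · rw [hn]; simp [isConsAux, hg, hv, hcy]
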